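-- pv_equiv track=rewrite | github.com/Tekrus/bass-practice-tracker | app/generators/utils.py | generate_tab
-- ===== SOURCE A (Python) =====
-- def generate_tab(notes_per_string):
--     """Generate tab notation for a sequence of notes."""
--     lines = {1: 'G|', 2: 'D|', 3: 'A|', 4: 'E|'}
--
--     for string_num, fret in notes_per_string:
--         for s in [1, 2, 3, 4]:
--             if s == string_num:
--                 lines[s] += f'{fret:2d}-'
--             else:
--                 lines[s] += '---'
--
--     for s in [1, 2, 3, 4]:
--         lines[s] += '|'
--
--     return '\n'.join([lines[1], lines[2], lines[3], lines[4]])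
-- ===== SOURCE B (Python) =====
-- def generate_tab(notes_per_string):
--     """Generate tab notation for a sequence of notes."""
--     notes = list(notes_per_string)
--     lines = [
--         prefix
--         + ''.join(f'{fret:2d}-' if string_num == s else '---'
--                   for string_num, fret in notes)
--         + '|'
--         for s, prefix in [(1, 'G|'), (2, 'D|'), (3, 'A|'), (4, 'E|')]
--     ]
--     return '\n'.join(lines)
-- ===== Notes on version B (the rewrite author's own statement) =====
-- stated objective: idiomatic
-- what changed: B builds each of the four tab lines independently by its own scan of the notes (a comprehension per string, joined at the end) instead of A's single pass that updates four dict accumulators per note.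
import Mathlib
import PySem

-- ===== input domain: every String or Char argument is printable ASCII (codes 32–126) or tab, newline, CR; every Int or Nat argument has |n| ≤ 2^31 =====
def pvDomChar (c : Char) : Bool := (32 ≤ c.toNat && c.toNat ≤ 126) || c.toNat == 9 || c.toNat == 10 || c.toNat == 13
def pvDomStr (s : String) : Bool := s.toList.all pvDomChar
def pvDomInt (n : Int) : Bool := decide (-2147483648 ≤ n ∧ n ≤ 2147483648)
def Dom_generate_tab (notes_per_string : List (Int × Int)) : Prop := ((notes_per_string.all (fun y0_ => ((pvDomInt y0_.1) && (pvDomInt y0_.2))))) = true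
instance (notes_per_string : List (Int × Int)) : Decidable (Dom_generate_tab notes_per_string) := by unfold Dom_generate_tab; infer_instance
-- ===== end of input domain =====

-- B rebuilds the tab line-by-line (one scan of the notes per string) instead of A's
-- single pass updating four accumulators per note; objective: more idiomatic decomposition.

-- shared formatting primitive: Python's f'{fret:2d}' (right-justify to width 2 with spaces)
def pvFmt2 (n : Int) : String :=
  let s := PySem.Int.toStr n
  String.ofList (List.replicate (2 - s.length) ' ') ++ s

-- ===== PORT A =====
-- A's dict 'lines' has the fixed keys 1,2,3,4 throughout; it is represented as a 4-tuple
-- (g,d,a,e) of the four accumulated strings; pvStepA is the body of A's per-note loop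
-- (its inner 'for s in [1,2,3,4]' unrolled, each slot extended as A's if/else does).
def pvStepA (st : String × String × String × String) (note : Int × Int) :
    String × String × String × String :=
  (if note.1 == 1 then st.1 ++ pvFmt2 note.2 ++ "-" else st.1 ++ "---",
   if note.1 == 2 then st.2.1 ++ pvFmt2 note.2 ++ "-" else st.2.1 ++ "---",
   if note.1 == 3 then st.2.2.1 ++ pvFmt2 note.2 ++ "-" else st.2.2.1 ++ "---",
   if note.1 == 4 then st.2.2.2 ++ pvFmt2 note.2 ++ "-" else st.2.2.2 ++ "---")

def generate_tab (notes_per_string : List (Int × Int)) : String :=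
  let st := notes_per_string.foldl pvStepA ("G|", "D|", "A|", "E|")
  String.intercalate "\n" [st.1 ++ "|", st.2.1 ++ "|", st.2.2.1 ++ "|", st.2.2.2 ++ "|"]

-- ===== PORT B =====
def pvCell (s : Int) (note : Int × Int) : String :=
  if note.1 == s then pvFmt2 note.2 ++ "-" else "---"

def pvLine (notes : List (Int × Int)) (s : Int) (prefix_ : String) : String :=
  prefix_ ++ String.join (notes.map (pvCell s)) ++ "|"

def generate_tab_alt (notes_per_string : List (Int × Int)) : String :=
  String.intercalate "\n"
    [pvLine notes_per_string 1 "G|", pvLine notes_per_string 2 "D|",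
     pvLine notes_per_string 3 "A|", pvLine notes_per_string 4 "E|"]

-- ===== PRECONDITION & SPEC =====
def Spec_generate_tab (notes_per_string : List (Int × Int)) (out : String) : Prop := out = generate_tab_alt notes_per_string
instance (notes_per_string : List (Int × Int)) (out : String) : Decidable (Spec_generate_tab notes_per_string out) := by unfold Spec_generate_tab; infer_instance

-- ===== CLAIM (what is proved, stated in full; the proofs are below) =====
def Claim_equal_generate_tab : Prop := ∀ (notes_per_string : List (Int × Int)), Dom_generate_tab notes_per_string → Spec_generate_tab notes_per_string (generate_tab notes_per_string)

-- ===== LEMMAS AND PROOFS =====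

theorem join_cons (s : String) (l : List String) :
    String.join (s :: l) = s ++ String.join l := by
  have h : ∀ (l : List String) (a : String), l.foldl (· ++ ·) a = a ++ String.join l := by
    intro l
    induction l with
    | nil => intro a; simp [String.join]
    | cons x xs ih =>
      intro a
      have e1 : String.join (x :: xs) = ("" ++ x) ++ String.join xs := by
        rw [show String.join (x :: xs) = List.foldl (· ++ ·) ("" ++ x) xs from rfl, ih ("" ++ x)]
      rw [List.foldl_cons, ih (a ++ x), e1]
      simp [String.append_assoc]
  rw [show String.join (s :: l) = List.foldl (· ++ ·) ("" ++ s) l from rfl, h l ("" ++ s)]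
  simp

theorem foldl_lines (notes : List (Int × Int)) (g d a e : String) :
    notes.foldl pvStepA (g, d, a, e)
    = (g ++ String.join (notes.map (pvCell 1)),
       d ++ String.join (notes.map (pvCell 2)),
       a ++ String.join (notes.map (pvCell 3)),
       e ++ String.join (notes.map (pvCell 4))) := by
  induction notes generalizing g d a e with
  | nil => simp [String.join]
  | cons hd tl ih =>
    simp only [List.foldl_cons, List.map_cons, join_cons, pvStepA, ih, pvCell]
    split_ifs <;> simp_all [String.append_assoc]

theorem generate_tab_spec : Claim_equal_generate_tab := by
  intro notes _
  unfold Spec_generate_tab generate_tab generate_tab_alt pvLine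
  rw [foldl_lines]
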